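-- pv_equiv track=rewrite | github.com/sivamaran/SaleX | Company_directory/company_scraper_complete.py | classify_page_type
-- ===== SOURCE A (Python) =====
-- def classify_page_type(url: str, html_content: str) -> str:
--     """Classify the type of page based on URL and content"""
--     url_lower = url.lower()
--     content_lower = html_content.lower()
--
--     # Search results page - check for common search result indicators
--     if ('search' in url_lower or 'find' in url_lower or 'query' in url_lower or
--         any(param in url_lower for param in ['q=', 'query=', 'search=', 'keyword=', 'find_desc=', 'ss=', 'search_terms='])):
--         if any(keyword in content_lower for keyword in ['result', 'company', 'business', 'supplier', 'manufacturer', 'listing', 'search', 'found', 'matches']):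
--             return "search_results"
--
--     # Company directory patterns - broader detection
--     if any(keyword in url_lower for keyword in ['directory', 'companies', 'business', 'suppliers']):
--         if any(keyword in content_lower for keyword in ['company', 'business', 'supplier', 'manufacturer', 'directory']):
--             return "company_directory"
--
--     # Individual company page patterns
--     if any(keyword in url_lower for keyword in ['profile', 'company', 'business', 'supplier', 'product']):
--         if any(keyword in content_lower for keyword in ['contact', 'about', 'services', 'products', 'phone', 'email']):
--             return "company_profile"
--
--     # Generic business directory - if it has multiple business listings
--     if any(keyword in content_lower for keyword in ['companies', 'businesses', 'suppliers', 'manufacturers']):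
--         return "company_directory"
--
--     return "unknown"
-- ===== SOURCE B (Python) =====
-- # Different algorithm: instead of testing each rule's keywords with `in` on demand,
-- # scan each lowered text ONCE position by position (a naive multi-pattern matcher),
-- # collecting the set of all keywords that occur; classification is then pure
-- # set-intersection logic on the two precomputed hit sets.
--
-- _URL_KEYWORDS = ["search", "find", "query", "q=", "query=", "search=", "keyword=",
--                  "find_desc=", "ss=", "search_terms=", "directory", "companies",
--                  "business", "suppliers", "profile", "company", "supplier", "product"]
-- _CONTENT_KEYWORDS = ["result", "company", "business", "supplier", "manufacturer",
--                      "listing", "search", "found", "matches", "directory", "contact",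
--                      "about", "services", "products", "phone", "email", "companies",
--                      "businesses", "suppliers", "manufacturers"]
--
--
-- def _keywords_found(text, keywords):
--     """One left-to-right scan: at each position record every keyword starting there."""
--     found = set()
--     for i in range(len(text)):
--         for k in keywords:
--             if text.startswith(k, i):
--                 found.add(k)
--     return found
--
--
-- def classify_page_type(url: str, html_content: str) -> str:
--     u = _keywords_found(url.lower(), _URL_KEYWORDS)
--     c = _keywords_found(html_content.lower(), _CONTENT_KEYWORDS)
--     if (u & {"search", "find", "query", "q=", "query=", "search=", "keyword=", "find_desc=", "ss=", "search_terms="}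
--             and c & {"result", "company", "business", "supplier", "manufacturer", "listing", "search", "found", "matches"}):
--         return "search_results"
--     if u & {"directory", "companies", "business", "suppliers"} and c & {"company", "business", "supplier", "manufacturer", "directory"}:
--         return "company_directory"
--     if u & {"profile", "company", "business", "supplier", "product"} and c & {"contact", "about", "services", "products", "phone", "email"}:
--         return "company_profile"
--     if c & {"companies", "businesses", "suppliers", "manufacturers"}:
--         return "company_directory"
--     return "unknown"
-- ===== Notes on version B (the rewrite author's own statement) =====
-- stated objective: alternative
-- what changed: B scans each lowered string once, position by position, collecting the set of all keywords occurring anywhere (a naive multi-pattern matcher), and then classifies by pure set-intersection tests on the two precomputed hit sets, instead of A's cascade of on-demand `in` substring tests per rule.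
import Mathlib
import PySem

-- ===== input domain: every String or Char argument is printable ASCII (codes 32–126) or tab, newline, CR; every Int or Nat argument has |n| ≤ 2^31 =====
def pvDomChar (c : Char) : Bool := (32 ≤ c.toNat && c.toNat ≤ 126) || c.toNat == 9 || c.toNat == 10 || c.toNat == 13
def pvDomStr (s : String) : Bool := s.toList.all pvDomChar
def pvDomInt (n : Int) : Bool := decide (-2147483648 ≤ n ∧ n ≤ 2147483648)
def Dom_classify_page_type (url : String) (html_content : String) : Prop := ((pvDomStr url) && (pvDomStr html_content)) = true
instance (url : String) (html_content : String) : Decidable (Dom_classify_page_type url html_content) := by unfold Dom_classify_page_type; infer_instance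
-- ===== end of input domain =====

-- B replaces A's cascade of on-demand substring tests by one positional scan of each
-- string collecting the set of keywords occurring, then set-intersection logic (objective: alternative).

-- any(k in s for k in keys) — used by PORT A
def pvAnyIn (keys : List String) (s : String) : Bool := keys.any (fun k => PySem.Str.isIn k s)

-- ===== PORT A =====
-- A-side fallthrough helpers: pvRestN is what A's code does from its N-th if-block onwards.
def pvRest4 (content_lower : String) : String :=
  if pvAnyIn ["companies", "businesses", "suppliers", "manufacturers"] content_lower then
    "company_directory"
  else "unknown"

def pvRest3 (url_lower : String) (content_lower : String) : String :=
  if pvAnyIn ["profile", "company", "business", "supplier", "product"] url_lower then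
    if pvAnyIn ["contact", "about", "services", "products", "phone", "email"] content_lower then
      "company_profile"
    else pvRest4 content_lower
  else pvRest4 content_lower

def pvRest2 (url_lower : String) (content_lower : String) : String :=
  if pvAnyIn ["directory", "companies", "business", "suppliers"] url_lower then
    if pvAnyIn ["company", "business", "supplier", "manufacturer", "directory"] content_lower then
      "company_directory"
    else pvRest3 url_lower content_lower
  else pvRest3 url_lower content_lower

def classify_page_type (url : String) (html_content : String) : String :=
  if (PySem.Str.isIn "search" (PySem.Str.lower url) || (PySem.Str.isIn "find" (PySem.Str.lower url) ||
      (PySem.Str.isIn "query" (PySem.Str.lower url) ||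
       pvAnyIn ["q=", "query=", "search=", "keyword=", "find_desc=", "ss=", "search_terms="] (PySem.Str.lower url)))) then
    if pvAnyIn ["result", "company", "business", "supplier", "manufacturer", "listing", "search", "found", "matches"] (PySem.Str.lower html_content) then
      "search_results"
    else pvRest2 (PySem.Str.lower url) (PySem.Str.lower html_content)
  else pvRest2 (PySem.Str.lower url) (PySem.Str.lower html_content)

-- ===== PORT B =====
def pvUrlKeywords : List String :=
  ["search", "find", "query", "q=", "query=", "search=", "keyword=",
   "find_desc=", "ss=", "search_terms=", "directory", "companies",
   "business", "suppliers", "profile", "company", "supplier", "product"]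

def pvContentKeywords : List String :=
  ["result", "company", "business", "supplier", "manufacturer",
   "listing", "search", "found", "matches", "directory", "contact",
   "about", "services", "products", "phone", "email", "companies",
   "businesses", "suppliers", "manufacturers"]

-- inner loop of _keywords_found: at one position (suffix), add every keyword starting there
def pvScanStep (keys : List String) (suffix : List Char) (found : PySem.Set String) : PySem.Set String :=
  keys.foldl (fun f k => if PySem.Chars.startswith suffix k.toList then PySem.Set.add f k else f) found

-- outer loop: 'for i in range(len(text))' as recursion over the suffixes of the text
def pvScan (keys : List String) : List Char → PySem.Set String → PySem.Set String
  | [], found => found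
  | c :: rest, found => pvScan keys rest (pvScanStep keys (c :: rest) found)

-- _keywords_found(text, keywords)
def pvKeywordsFound (text : String) (keys : List String) : PySem.Set String :=
  pvScan keys text.toList PySem.Set.empty

-- truthiness of 'found & {…}': the intersection is nonempty
def pvHit (found : PySem.Set String) (keys : List String) : Bool :=
  !(PySem.Set.inter found keys).isEmpty

def classify_page_type_alt (url : String) (html_content : String) : String :=
  let u := pvKeywordsFound (PySem.Str.lower url) pvUrlKeywords
  let c := pvKeywordsFound (PySem.Str.lower html_content) pvContentKeywords
  if pvHit u ["search", "find", "query", "q=", "query=", "search=", "keyword=", "find_desc=", "ss=", "search_terms="] &&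
     pvHit c ["result", "company", "business", "supplier", "manufacturer", "listing", "search", "found", "matches"] then
    "search_results"
  else if pvHit u ["directory", "companies", "business", "suppliers"] &&
          pvHit c ["company", "business", "supplier", "manufacturer", "directory"] then
    "company_directory"
  else if pvHit u ["profile", "company", "business", "supplier", "product"] &&
          pvHit c ["contact", "about", "services", "products", "phone", "email"] then
    "company_profile"
  else if pvHit c ["companies", "businesses", "suppliers", "manufacturers"] then
    "company_directory"
  else "unknown"

-- ===== PRECONDITION & SPEC =====
def Spec_classify_page_type (url : String) (html_content : String) (out : String) : Prop := out = classify_page_type_alt url html_content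
instance (url : String) (html_content : String) (out : String) : Decidable (Spec_classify_page_type url html_content out) := by unfold Spec_classify_page_type; infer_instance

-- ===== CLAIM (what is proved, stated in full; the proofs are below) =====
def Claim_equal_classify_page_type : Prop := ∀ (url : String) (html_content : String), Dom_classify_page_type url html_content → Spec_classify_page_type url html_content (classify_page_type url html_content)

-- ===== LEMMAS AND PROOFS =====

theorem mem_pvScanStep (keys : List String) (suffix : List Char) (found : PySem.Set String) (k : String) :
    k ∈ pvScanStep keys suffix found ↔
      k ∈ found ∨ (k ∈ keys ∧ PySem.Chars.startswith suffix k.toList = true) := by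
  induction keys generalizing found with
  | nil => simp [pvScanStep]
  | cons a tl ih =>
    have hstep : pvScanStep (a :: tl) suffix found
        = pvScanStep tl suffix (if PySem.Chars.startswith suffix a.toList then PySem.Set.add found a else found) := rfl
    rw [hstep, ih]
    by_cases h : PySem.Chars.startswith suffix a.toList = true
    · rw [if_pos h]
      simp only [PySem.Set.mem_add, List.mem_cons]
      constructor
      · rintro ((h1 | h1) | ⟨h1, h2⟩)
        · exact Or.inl h1
        · exact Or.inr ⟨Or.inl h1, by rw [h1]; exact h⟩
        · exact Or.inr ⟨Or.inr h1, h2⟩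
      · rintro (h1 | ⟨h1 | h1, h2⟩)
        · exact Or.inl (Or.inl h1)
        · exact Or.inl (Or.inr h1)
        · exact Or.inr ⟨h1, h2⟩
    · rw [if_neg h]
      simp only [List.mem_cons]
      constructor
      · rintro (h1 | ⟨h1, h2⟩)
        · exact Or.inl h1
        · exact Or.inr ⟨Or.inr h1, h2⟩
      · rintro (h1 | ⟨h1 | h1, h2⟩)
        · exact Or.inl h1
        · exact absurd (by rw [← h1]; exact h2) h
        · exact Or.inr ⟨h1, h2⟩

theorem mem_pvScan (keys : List String) (s : List Char) (found : PySem.Set String) (k : String) :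
    k ∈ pvScan keys s found ↔
      k ∈ found ∨ (k ∈ keys ∧ ∃ j, j < s.length ∧ PySem.Chars.startswith (s.drop j) k.toList = true) := by
  induction s generalizing found with
  | nil => simp [pvScan]
  | cons c rest ih =>
    rw [pvScan, ih, mem_pvScanStep]
    constructor
    · rintro ((h1 | ⟨h1, h2⟩) | ⟨h1, j, hj, h2⟩)
      · exact Or.inl h1
      · exact Or.inr ⟨h1, 0, by simp, h2⟩
      · exact Or.inr ⟨h1, j + 1, by simpa using hj, by simpa using h2⟩
    · rintro (h1 | ⟨h1, j, hj, h2⟩)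
      · exact Or.inl (Or.inl h1)
      · cases j with
        | zero => exact Or.inl (Or.inr ⟨h1, by simpa using h2⟩)
        | succ j => exact Or.inr ⟨h1, j, by simpa using hj, by simpa using h2⟩

theorem mem_pvKeywordsFound (text : String) (keys : List String) (k : String)
    (hne : k.toList ≠ []) :
    (k ∈ pvKeywordsFound text keys) ↔ (k ∈ keys ∧ PySem.Str.isIn k text = true) := by
  rw [pvKeywordsFound, mem_pvScan]
  simp only [PySem.Set.empty, List.not_mem_nil, false_or]
  constructor
  · rintro ⟨h1, j, hj, h2⟩
    refine ⟨h1, ?_⟩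
    rw [show PySem.Str.isIn k text = PySem.Chars.isIn k.toList text.toList by simp]
    exact (PySem.Chars.exists_prefix_drop_iff_isIn _ _).mp ⟨j, (PySem.Chars.startswith_iff _ _).mp h2⟩
  · rintro ⟨h1, h2⟩
    refine ⟨h1, ?_⟩
    rw [show PySem.Str.isIn k text = PySem.Chars.isIn k.toList text.toList by simp] at h2
    obtain ⟨j, hj⟩ := (PySem.Chars.exists_prefix_drop_iff_isIn _ _).mpr h2
    by_cases hb : j < text.toList.length
    · exact ⟨j, hb, (PySem.Chars.startswith_iff _ _).mpr hj⟩
    · exfalso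
      rw [List.drop_eq_nil_of_le (le_of_not_gt hb)] at hj
      exact hne (List.prefix_nil.mp hj)

-- B's intersection test on the precomputed hit set equals A's on-demand any(k in s …)
theorem pvHit_eq (KEYS S : List String) (s : String)
    (hsub : ∀ k ∈ S, k ∈ KEYS) (hne : ∀ k ∈ S, k.toList ≠ []) :
    pvHit (pvKeywordsFound s KEYS) S = pvAnyIn S s := by
  have hmem : ∀ k ∈ S, (k ∈ pvKeywordsFound s KEYS) ↔ PySem.Str.isIn k s = true := by
    intro k hk
    rw [mem_pvKeywordsFound _ _ _ (hne k hk)]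
    exact ⟨fun h => h.2, fun h2 => ⟨hsub k hk, h2⟩⟩
  unfold pvHit pvAnyIn
  by_cases h : ∃ k ∈ S, PySem.Str.isIn k s = true
  · obtain ⟨k, hk1, hk2⟩ := h
    have h1 : k ∈ PySem.Set.inter (pvKeywordsFound s KEYS) S :=
      (PySem.Set.mem_inter _ _ _).mpr ⟨(hmem k hk1).mpr hk2, hk1⟩
    have h2 : (PySem.Set.inter (pvKeywordsFound s KEYS) S).isEmpty = false := by
      cases hE : (PySem.Set.inter (pvKeywordsFound s KEYS) S).isEmpty
      · rfl
      · rw [List.isEmpty_iff] at hE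
        rw [hE] at h1
        simp at h1
    rw [h2]
    symm
    rw [Bool.not_false, List.any_eq_true]
    exact ⟨k, hk1, hk2⟩
  · push Not at h
    have h2 : (PySem.Set.inter (pvKeywordsFound s KEYS) S).isEmpty = true := by
      rw [List.isEmpty_iff]
      by_contra hne'
      obtain ⟨x, hx⟩ := List.exists_mem_of_ne_nil _ hne'
      rcases (PySem.Set.mem_inter _ _ _).mp hx with ⟨hx1, hx2⟩
      exact h x hx2 ((hmem x hx2).mp hx1)
    rw [h2]
    symm
    rw [Bool.not_true, List.any_eq_false]
    intro k hk
    simpa using h k hk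

-- early-return inside a guarded block ≡ a single conjoined guard
theorem if_nest_and (u c : Bool) (r rest : String) :
    (if u then (if c then r else rest) else rest) = (if u && c then r else rest) := by
  cases u <;> cases c <;> simp

-- A's or-chain over the search indicators is the any over the merged keyword list
theorem chain_eq (s : String) :
    (PySem.Str.isIn "search" s || (PySem.Str.isIn "find" s || (PySem.Str.isIn "query" s ||
      pvAnyIn ["q=", "query=", "search=", "keyword=", "find_desc=", "ss=", "search_terms="] s)))
    = pvAnyIn ["search", "find", "query", "q=", "query=", "search=", "keyword=", "find_desc=", "ss=", "search_terms="] s := rfl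

-- ===== VERDICT (by name: the statement is the Claim_ definition above) =====
theorem classify_page_type_spec : Claim_equal_classify_page_type := by
  intro url html_content _
  show classify_page_type url html_content = classify_page_type_alt url html_content
  unfold classify_page_type classify_page_type_alt pvRest2 pvRest3 pvRest4
  rw [chain_eq, if_nest_and, if_nest_and, if_nest_and]
  dsimp only []
  rw [pvHit_eq pvUrlKeywords _ _ (by decide) (by decide),
      pvHit_eq pvContentKeywords _ _ (by decide) (by decide),
      pvHit_eq pvUrlKeywords _ _ (by decide) (by decide),
      pvHit_eq pvContentKeywords _ _ (by decide) (by decide),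
      pvHit_eq pvUrlKeywords _ _ (by decide) (by decide),
      pvHit_eq pvContentKeywords _ _ (by decide) (by decide),
      pvHit_eq pvContentKeywords _ _ (by decide) (by decide)]
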